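-- pv_equiv track=rewrite | github.com/wolferobert3/diachronic_code | convokit_functions.py | create_year_month_list
-- ===== SOURCE A (Python) =====
-- def create_year_month_list(start_year, start_month, end_year, end_month):
--
--     month_year_list = []
--
--     for year in range(start_year, end_year + 1):
--
--         first_month, last_month = start_month, end_month
--
--         if year != start_year:
--
--             first_month = 1
--
--         if year != end_year:
--
--             last_month = 13
--
--         for month in range(first_month, last_month):
--
--             if month < 10:
--
--                 month_year_list.append(f'0{month}/{year}')
--
--             else:
--
--                 month_year_list.append(f'{month}/{year}')
--
--     return month_year_list
-- ===== SOURCE B (Python) =====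
-- def _fmt(month, year):
--     prefix = '0' if month < 10 else ''
--     return f'{prefix}{month}/{year}'
--
--
-- def create_year_month_list(start_year, start_month, end_year, end_month):
--     if start_year == end_year:
--         return [_fmt(m, start_year) for m in range(start_month, end_month)]
--     if end_year < start_year:
--         return []
--     head = [_fmt(m, start_year) for m in range(start_month, 13)]
--     body = [_fmt(m, y)
--             for y in range(start_year + 1, end_year)
--             for m in range(1, 13)]
--     tail = [_fmt(m, end_year) for m in range(1, end_month)]
--     return head + body + tail
-- ===== Notes on version B (the rewrite author's own statement) =====
-- stated objective: alternative
-- what changed: Replaced A's nested year/month loops with per-year boundary conditionals by an explicit three-segment construction (first-year comprehension, full middle-years comprehension, last-year comprehension) concatenated, with the single/empty-range cases handled up front.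
import Mathlib
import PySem

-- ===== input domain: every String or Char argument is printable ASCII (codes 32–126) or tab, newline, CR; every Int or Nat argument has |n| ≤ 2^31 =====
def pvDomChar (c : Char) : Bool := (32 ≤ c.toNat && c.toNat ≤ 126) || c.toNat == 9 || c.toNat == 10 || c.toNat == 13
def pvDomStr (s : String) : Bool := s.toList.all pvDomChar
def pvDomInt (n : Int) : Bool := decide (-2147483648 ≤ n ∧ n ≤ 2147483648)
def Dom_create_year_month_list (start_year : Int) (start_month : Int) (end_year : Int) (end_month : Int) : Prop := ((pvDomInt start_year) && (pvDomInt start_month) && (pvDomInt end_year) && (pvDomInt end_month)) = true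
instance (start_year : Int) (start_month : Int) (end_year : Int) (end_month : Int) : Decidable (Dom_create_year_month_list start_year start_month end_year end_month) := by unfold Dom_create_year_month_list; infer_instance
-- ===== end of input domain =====

-- B replaces A's nested year/month loops with two boundary conditionals by three
-- explicit segments (first year, full middle years, last year); same cost ("alternative").

-- ===== PORT A =====
def create_year_month_list (start_year : Int) (start_month : Int) (end_year : Int) (end_month : Int) : List String :=
  (PySem.List.pyRange start_year (end_year + 1) 1).foldl (fun month_year_list year =>
    let first_month := if year ≠ start_year then 1 else start_month
    let last_month := if year ≠ end_year then 13 else end_month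
    (PySem.List.pyRange first_month last_month 1).foldl (fun acc month =>
      if month < 10 then
        acc ++ ["0" ++ PySem.Int.toStr month ++ "/" ++ PySem.Int.toStr year]
      else
        acc ++ [PySem.Int.toStr month ++ "/" ++ PySem.Int.toStr year]) month_year_list) []

-- ===== PORT B =====
def fmtMY (month : Int) (year : Int) : String :=
  let pre := if month < 10 then "0" else ""
  pre ++ PySem.Int.toStr month ++ "/" ++ PySem.Int.toStr year

def create_year_month_list_alt (start_year : Int) (start_month : Int) (end_year : Int) (end_month : Int) : List String :=
  if start_year = end_year then
    (PySem.List.pyRange start_month end_month 1).map (fun m => fmtMY m start_year)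
  else if end_year < start_year then
    []
  else
    ((PySem.List.pyRange start_month 13 1).map (fun m => fmtMY m start_year))
    ++ ((PySem.List.pyRange (start_year + 1) end_year 1).flatMap (fun y =>
          (PySem.List.pyRange 1 13 1).map (fun m => fmtMY m y)))
    ++ ((PySem.List.pyRange 1 end_month 1).map (fun m => fmtMY m end_year))

-- ===== PRECONDITION & SPEC =====
def Spec_create_year_month_list (start_year : Int) (start_month : Int) (end_year : Int) (end_month : Int) (out : List String) : Prop := out = create_year_month_list_alt start_year start_month end_year end_month
instance (start_year : Int) (start_month : Int) (end_year : Int) (end_month : Int) (out : List String) : Decidable (Spec_create_year_month_list start_year start_month end_year end_month out) := by unfold Spec_create_year_month_list; infer_instance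

-- ===== CLAIM (what is proved, stated in full; the proofs are below) =====
def Claim_equal_create_year_month_list : Prop := ∀ (start_year : Int) (start_month : Int) (end_year : Int) (end_month : Int), Dom_create_year_month_list start_year start_month end_year end_month → Spec_create_year_month_list start_year start_month end_year end_month (create_year_month_list start_year start_month end_year end_month)

-- ===== LEMMAS AND PROOFS =====

-- A's inner loop appends one formatted entry per month: it is a map.
theorem inner_loop_eq (f l year : Int) (acc : List String) :
    (PySem.List.pyRange f l 1).foldl (fun acc month =>
      if month < 10 then
        acc ++ ["0" ++ PySem.Int.toStr month ++ "/" ++ PySem.Int.toStr year]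
      else
        acc ++ [PySem.Int.toStr month ++ "/" ++ PySem.Int.toStr year]) acc
    = acc ++ (PySem.List.pyRange f l 1).map (fun m => fmtMY m year) := by
  have h : (fun (acc : List String) (month : Int) =>
      if month < 10 then
        acc ++ ["0" ++ PySem.Int.toStr month ++ "/" ++ PySem.Int.toStr year]
      else
        acc ++ [PySem.Int.toStr month ++ "/" ++ PySem.Int.toStr year])
      = fun acc month => acc ++ [fmtMY month year] := by
    funext a m
    by_cases hm : m < 10 <;> simp [fmtMY, hm]
  rw [h, PySem.List.foldl_append_singleton_eq_map]

-- A's whole computation as a flatMap over the year range.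
theorem a_eq_flatMap (sy sm ey em : Int) :
    create_year_month_list sy sm ey em
    = (PySem.List.pyRange sy (ey + 1) 1).flatMap (fun year =>
        (PySem.List.pyRange (if year ≠ sy then 1 else sm)
                            (if year ≠ ey then 13 else em) 1).map (fun m => fmtMY m year)) := by
  unfold create_year_month_list
  have h : (fun (month_year_list : List String) (year : Int) =>
      (PySem.List.pyRange (if year ≠ sy then 1 else sm) (if year ≠ ey then 13 else em) 1).foldl
        (fun acc month =>
          if month < 10 then
            acc ++ ["0" ++ PySem.Int.toStr month ++ "/" ++ PySem.Int.toStr year]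
          else
            acc ++ [PySem.Int.toStr month ++ "/" ++ PySem.Int.toStr year]) month_year_list)
      = fun month_year_list year => month_year_list ++
          (PySem.List.pyRange (if year ≠ sy then 1 else sm) (if year ≠ ey then 13 else em) 1).map
            (fun m => fmtMY m year) := by
    funext a y
    exact inner_loop_eq _ _ _ _
  simp only [h]
  rw [PySem.List.foldl_append_eq_flatMap]
  simp

-- ===== VERDICT (by name: the statement is the Claim_ definition above) =====
theorem create_year_month_list_spec : Claim_equal_create_year_month_list := by
  intro sy sm ey em _
  unfold Spec_create_year_month_list
  rw [a_eq_flatMap]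
  unfold create_year_month_list_alt
  by_cases heq : sy = ey
  · subst heq
    simp [PySem.List.pyRange_one_singleton]
  · by_cases hlt : ey < sy
    · have : ey + 1 ≤ sy := by omega
      simp [heq, hlt, PySem.List.pyRange_one_eq_nil this]
    · have h1 : sy < ey := by omega
      rw [PySem.List.pyRange_one_append sy (sy + 1) (ey + 1) (by omega) (by omega),
          PySem.List.pyRange_one_append (sy + 1) ey (ey + 1) (by omega) (by omega)]
      rw [PySem.List.pyRange_one_singleton, PySem.List.pyRange_one_singleton]
      simp only [List.flatMap_append, List.flatMap_cons, List.flatMap_nil, List.append_nil]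
      have hmid : (PySem.List.pyRange (sy + 1) ey 1).flatMap (fun year =>
          (PySem.List.pyRange (if year ≠ sy then 1 else sm) (if year ≠ ey then 13 else em) 1).map
            (fun m => fmtMY m year))
          = (PySem.List.pyRange (sy + 1) ey 1).flatMap (fun y =>
              (PySem.List.pyRange 1 13 1).map (fun m => fmtMY m y)) := by
        apply List.flatMap_congr
        intro y hy
        rw [PySem.List.mem_pyRange_one] at hy
        have h1 : y ≠ sy := by omega
        have h2 : y ≠ ey := by omega
        simp [h1, h2]
      rw [hmid]
      have hsy : (sy ≠ sy) = False := by simp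
      have hsyey : (sy ≠ ey) = True := by simp [heq]
      have heysy : (ey ≠ sy) = True := by simp [Ne.symm heq]
      have heyey : (ey ≠ ey) = False := by simp
      simp only [hsy, hsyey, heysy, heyey, if_true, if_false]
      simp [heq, hlt, List.append_assoc]
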